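-- pv_equiv track=rewrite | github.com/AlifSrSE/ProblemSolves | 2050A-lineBreaks.py | solve
-- ===== SOURCE A (Python) =====
-- def solve(s, m):
--     result = 0
--     for si in s:
--         if len(si) > m:
--             break
--         m -= len(si)
--         result += 1
--     return result
-- ===== SOURCE B (Python) =====
-- from itertools import accumulate
--
-- def solve(s, m):
--     prefix = list(accumulate(len(si) for si in s))
--     return sum(1 for p in prefix if p <= m)
-- ===== Notes on version B (the rewrite author's own statement) =====
-- stated objective: alternative
-- what changed: Replaces the early-exit loop that mutates the remaining budget m with a two-pass formulation: build the monotone prefix-sum table of word lengths, then count the entries that are <= m.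
import Mathlib
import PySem

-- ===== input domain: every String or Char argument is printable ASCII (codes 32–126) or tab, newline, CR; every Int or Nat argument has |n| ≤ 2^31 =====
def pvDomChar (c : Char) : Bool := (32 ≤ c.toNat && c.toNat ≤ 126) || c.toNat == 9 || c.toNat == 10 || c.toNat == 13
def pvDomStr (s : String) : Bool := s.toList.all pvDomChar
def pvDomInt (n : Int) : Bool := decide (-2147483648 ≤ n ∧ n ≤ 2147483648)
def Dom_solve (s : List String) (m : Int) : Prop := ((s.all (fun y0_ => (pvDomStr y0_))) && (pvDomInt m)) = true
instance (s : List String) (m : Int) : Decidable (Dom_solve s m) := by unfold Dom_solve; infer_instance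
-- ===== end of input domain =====

-- B replaces A's early-exit budget-mutating loop by building the prefix-sum table of
-- word lengths and counting the entries ≤ m (alternative decomposition, same cost).

-- ===== PORT A =====
-- the for-loop with `break`, state = (remaining budget m, result)
def solveLoop : List String → Int → Int → Int
  | [], _, result => result
  | si :: rest, m, result =>
      if PySem.Str.len si > m then result
      else solveLoop rest (m - PySem.Str.len si) (result + 1)

def solve (s : List String) (m : Int) : Int := solveLoop s m 0

-- ===== PORT B =====
-- itertools.accumulate over the word lengths (running sum `acc`)
def prefixSums : List String → Int → List Int
  | [], _ => []
  | si :: rest, acc => (acc + PySem.Str.len si) :: prefixSums rest (acc + PySem.Str.len si)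

-- sum(1 for p in prefix if p <= m)
def solve_alt (s : List String) (m : Int) : Int :=
  ((prefixSums s 0).countP (fun p => decide (p ≤ m)) : Int)

-- ===== PRECONDITION & SPEC =====
def Spec_solve (s : List String) (m : Int) (out : Int) : Prop := out = solve_alt s m
instance (s : List String) (m : Int) (out : Int) : Decidable (Spec_solve s m out) := by unfold Spec_solve; infer_instance

-- ===== CLAIM (what is proved, stated in full; the proofs are below) =====
def Claim_equal_solve : Prop := ∀ (s : List String) (m : Int), Dom_solve s m → Spec_solve s m (solve s m)

-- ===== LEMMAS AND PROOFS =====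

-- every prefix sum starting from acc is ≥ acc (word lengths are nonnegative)
theorem prefixSums_le (s : List String) : ∀ (a : Int) (p : Int), p ∈ prefixSums s a → a ≤ p := by
  induction s with
  | nil => intro a p h; simp [prefixSums] at h
  | cons si rest ih =>
      intro a p h
      simp only [prefixSums, List.mem_cons] at h
      have hL : (0 : Int) ≤ PySem.Str.len si := by simp [PySem.Str.len_eq]
      rcases h with h | h
      · omega
      · have := ih (a + PySem.Str.len si) p h; omega

-- shifting the accumulator shifts every prefix sum
theorem prefixSums_shift (s : List String) : ∀ (a : Int),
    prefixSums s a = (prefixSums s 0).map (fun p => a + p) := by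
  induction s with
  | nil => intro a; simp [prefixSums]
  | cons si rest ih =>
      intro a
      simp only [prefixSums, List.map_cons, ih (a + PySem.Str.len si), ih (0 + PySem.Str.len si),
        List.map_map]
      refine congrArg₂ List.cons (by omega) ?_
      apply List.map_congr_left
      intro x _
      simp only [Function.comp]
      omega

-- loop characterisation: A's loop counts the prefix sums that fit in m
theorem solveLoop_eq (s : List String) : ∀ (m r : Int),
    solveLoop s m r = r + ((prefixSums s 0).countP (fun p => decide (p ≤ m)) : Int) := by
  induction s with
  | nil => intro m r; simp [solveLoop, prefixSums]
  | cons si rest ih =>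
      intro m r
      have hL : (0 : Int) ≤ PySem.Str.len si := by simp [PySem.Str.len_eq]
      by_cases h : PySem.Str.len si > m
      · have hcnt : (prefixSums rest (0 + PySem.Str.len si)).countP (fun p => decide (p ≤ m)) = 0 := by
          apply List.countP_eq_zero.2
          intro p hp
          have := prefixSums_le rest (0 + PySem.Str.len si) p hp
          simp only [decide_eq_true_eq]
          omega
        simp only [solveLoop, prefixSums, if_pos h, List.countP_cons, hcnt]
        have h' : m < (si.length : Int) := by simpa [PySem.Str.len_eq] using h
        simp [h']
      · have hcond : decide ((0 + PySem.Str.len si) ≤ m) = true := by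
          simp only [decide_eq_true_eq]; omega
        simp only [solveLoop, prefixSums, if_neg h, List.countP_cons, hcond,
          prefixSums_shift rest (0 + PySem.Str.len si), List.countP_map,
          ih (m - PySem.Str.len si) (r + 1)]
        have hpred : ((fun p => decide (p ≤ m)) ∘ fun p => 0 + PySem.Str.len si + p)
            = fun p => decide (p ≤ m - PySem.Str.len si) := by
          funext x
          simp only [Function.comp, decide_eq_decide, PySem.Str.len_eq]
          omega
        rw [hpred]
        push_cast
        ring

-- ===== VERDICT (by name: the statement is the Claim_ definition above) =====
theorem solve_spec : Claim_equal_solve := by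
  intro s m _
  show solve s m = solve_alt s m
  rw [solve, solveLoop_eq s m 0, solve_alt]
  ring
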